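-- pv_equiv track=rewrite | github.com/bjourne/musicgen | musicgen/scode.py | guess_initial_pitch
-- ===== SOURCE A (Python) =====
-- INSN_REL_PITCH = 'R'
--
-- def guess_initial_pitch(scode):
--     diffs = [arg for (cmd, arg) in scode if cmd == INSN_REL_PITCH]
--     at_pitch, max_pitch, min_pitch = 0, 0, 0
--     for diff in diffs:
--         at_pitch += diff
--         max_pitch = max(at_pitch, max_pitch)
--         min_pitch = min(at_pitch, min_pitch)
--     return -min_pitch
-- ===== SOURCE B (Python) =====
-- INSN_REL_PITCH = 'R'
--
-- def guess_initial_pitch(scode):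
--     # Right-to-left pass: `need` is the minimal starting pitch that keeps
--     # every running pitch of the remaining suffix non-negative.
--     need = 0
--     for cmd, arg in reversed(scode):
--         if cmd == INSN_REL_PITCH:
--             need = max(0, need - arg)
--     return need
-- ===== Notes on version B (the rewrite author's own statement) =====
-- stated objective: alternative
-- what changed: Replaces the forward running-min/max fold over filtered prefix sums by a single backward pass with the recurrence need = max(0, need - arg), dropping the diffs list and the unused max_pitch.
import Mathlib
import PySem

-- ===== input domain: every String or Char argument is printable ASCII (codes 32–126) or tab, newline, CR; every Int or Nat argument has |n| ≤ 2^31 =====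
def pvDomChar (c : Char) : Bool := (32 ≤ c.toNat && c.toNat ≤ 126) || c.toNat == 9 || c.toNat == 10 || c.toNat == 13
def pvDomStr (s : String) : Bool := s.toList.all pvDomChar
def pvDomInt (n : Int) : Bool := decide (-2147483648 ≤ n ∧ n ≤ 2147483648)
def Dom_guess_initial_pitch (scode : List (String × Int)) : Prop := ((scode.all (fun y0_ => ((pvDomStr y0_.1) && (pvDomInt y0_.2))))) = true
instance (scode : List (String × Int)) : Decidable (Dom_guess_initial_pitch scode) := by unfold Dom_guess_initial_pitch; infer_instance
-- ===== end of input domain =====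

-- B replaces A's forward running-min fold over filtered prefix sums by one backward
-- pass with the recurrence need = max(0, need - arg) (objective: alternative).

-- ===== PORT A =====
def guess_initial_pitch (scode : List (String × Int)) : Int :=
  let diffs := (scode.filter (fun p => p.1 == "R")).map Prod.snd
  let st := diffs.foldl
    (fun (st : Int × Int × Int) diff =>
      let at_pitch := st.1 + diff
      (at_pitch, max at_pitch st.2.1, min at_pitch st.2.2))
    (0, 0, 0);
  -st.2.2

-- ===== PORT B =====
def guess_initial_pitch_alt (scode : List (String × Int)) : Int :=
  scode.reverse.foldl
    (fun need p => if p.1 == "R" then max 0 (need - p.2) else need) 0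

-- ===== PRECONDITION & SPEC =====
def Spec_guess_initial_pitch (scode : List (String × Int)) (out : Int) : Prop := out = guess_initial_pitch_alt scode
instance (scode : List (String × Int)) (out : Int) : Decidable (Spec_guess_initial_pitch scode out) := by unfold Spec_guess_initial_pitch; infer_instance

-- ===== CLAIM (what is proved, stated in full; the proofs are below) =====
def Claim_equal_guess_initial_pitch : Prop := ∀ (scode : List (String × Int)), Dom_guess_initial_pitch scode → Spec_guess_initial_pitch scode (guess_initial_pitch scode)

-- ===== LEMMAS AND PROOFS =====

/-- B's recurrence on a plain list of diffs, as a foldr. -/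
def pvNeed (diffs : List Int) : Int :=
  diffs.foldr (fun d need => max 0 (need - d)) 0

theorem pvNeed_nonneg (diffs : List Int) : 0 ≤ pvNeed diffs := by
  cases diffs with
  | nil => simp [pvNeed]
  | cons d t => simp [pvNeed]

/-- A's fold invariant: the min component equals min mn (a - pvNeed diffs). -/
theorem foldA_min (diffs : List Int) :
    ∀ a mx mn : Int, mn ≤ a →
    (diffs.foldl
      (fun (st : Int × Int × Int) diff =>
        (st.1 + diff, max (st.1 + diff) st.2.1, min (st.1 + diff) st.2.2))
      (a, mx, mn)).2.2 = min mn (a - pvNeed diffs) := by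
  induction diffs with
  | nil => intro a mx mn h; simp [pvNeed]; omega
  | cons d t ih =>
      intro a mx mn h
      simp only [List.foldl_cons]
      rw [ih (a + d) (max (a + d) mx) (min (a + d) mn) (by omega)]
      have h0 : 0 ≤ pvNeed t := pvNeed_nonneg t
      have : pvNeed (d :: t) = max 0 (pvNeed t - d) := by simp [pvNeed]
      rw [this]
      omega

/-- B's foldr on scode equals pvNeed of the filtered diffs. -/
theorem foldrB_eq (scode : List (String × Int)) :
    List.foldr (fun (x : String × Int) y => if x.1 == "R" then max 0 (y - x.2) else y) 0 scode
      = pvNeed ((scode.filter (fun p => p.1 == "R")).map Prod.snd) := by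
  induction scode with
  | nil => simp [pvNeed]
  | cons p t ih =>
      simp only [beq_iff_eq] at ih ⊢
      simp only [pvNeed] at ih
      by_cases hp : p.1 = "R"
      · simp [pvNeed, hp, ih]
      · simp [pvNeed, hp, ih]

/-- B's fold over scode equals pvNeed of the filtered diffs. -/
theorem foldB_eq (scode : List (String × Int)) :
    guess_initial_pitch_alt scode
      = pvNeed ((scode.filter (fun p => p.1 == "R")).map Prod.snd) := by
  unfold guess_initial_pitch_alt
  rw [List.foldl_reverse]
  exact foldrB_eq scode

-- ===== VERDICT (by name: the statement is the Claim_ definition above) =====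
theorem guess_initial_pitch_spec : Claim_equal_guess_initial_pitch := by
  intro scode _
  unfold Spec_guess_initial_pitch
  rw [foldB_eq]
  have h0 := pvNeed_nonneg ((scode.filter (fun p => p.1 == "R")).map Prod.snd)
  have h := foldA_min ((scode.filter (fun p => p.1 == "R")).map Prod.snd) 0 0 0 le_rfl
  unfold guess_initial_pitch
  simp only []
  omega
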